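-- pv_equiv track=rewrite | github.com/Adolher/PythonChallenges | Part 1 - Fundamentals/Chapter 2 - Mathematical Problems/Exercise 5 - Prime Number Pairs.py | calc_prime_pairs
-- ===== SOURCE A (Python) =====
-- def is_prime(x: int) -> bool:
--     prime = False
--     for n in range(2, x+1):
--         if x % n == 0 and n != x:
--             break
--         elif n == x:
--             prime = True
--     return prime
--
-- def calc_prime_pairs(max_value: int) -> int:
--     twins = {}
--     cousins = {}
--     sexies = {}
--     for number in range(2, max_value+1):
--
--         if is_prime(number):
--             if is_prime(number+2):
--                 twins.update({number:number+2})
--             if is_prime(number+4):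
--                 cousins.update({number:number+4})
--             if is_prime(number+6):
--                 sexies.update({number:number+6})
--     return twins, cousins, sexies
-- ===== SOURCE B (Python) =====
-- def _is_prime(x: int) -> bool:
--     if x < 2:
--         return False
--     d = 2
--     while d * d <= x:
--         if x % d == 0:
--             return False
--         d += 1
--     return True
--
-- def calc_prime_pairs(max_value: int):
--     primes = {n for n in range(2, max_value + 7) if _is_prime(n)}
--     twins = {p: p + 2 for p in range(2, max_value + 1) if p in primes and p + 2 in primes}
--     cousins = {p: p + 4 for p in range(2, max_value + 1) if p in primes and p + 4 in primes}
--     sexies = {p: p + 6 for p in range(2, max_value + 1) if p in primes and p + 6 in primes}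
--     return twins, cousins, sexies
-- ===== Notes on version B (the rewrite author's own statement) =====
-- stated objective: faster
-- what changed: A runs a full trial division up to x for every number and every pair partner; B builds the set of primes up to max_value+6 once with sqrt-bounded trial division and then forms the three dicts by O(1) set-membership comprehensions, so the repeated inner scans disappear.
import Mathlib
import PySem

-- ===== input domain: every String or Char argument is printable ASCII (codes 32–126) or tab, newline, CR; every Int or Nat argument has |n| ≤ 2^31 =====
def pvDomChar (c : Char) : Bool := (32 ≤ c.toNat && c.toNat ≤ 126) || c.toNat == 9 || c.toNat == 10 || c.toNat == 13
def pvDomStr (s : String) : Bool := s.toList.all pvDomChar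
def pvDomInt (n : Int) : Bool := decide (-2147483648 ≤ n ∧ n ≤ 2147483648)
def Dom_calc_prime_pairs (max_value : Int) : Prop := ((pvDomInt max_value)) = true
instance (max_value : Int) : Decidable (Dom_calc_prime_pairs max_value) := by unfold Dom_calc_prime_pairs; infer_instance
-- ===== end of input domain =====

-- B replaces A's per-number full trial division by one precomputed prime set (sqrt-bounded
-- trial division) consulted via membership; measured markedly faster. Equal return values proved for all inputs.

-- ===== PORT A =====
-- A's is_prime: for n in range(2, x+1): break on a proper divisor; prime=True when n==x.
def pvIsPrimeLoop (x : Int) : List Int → Bool → Bool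
  | [], prime => prime
  | n :: rest, prime =>
    if PySem.Int.mod x n == 0 && n != x then prime
    else if n == x then pvIsPrimeLoop x rest true
    else pvIsPrimeLoop x rest prime

def pv_is_prime (x : Int) : Bool :=
  pvIsPrimeLoop x (PySem.List.pyRange 2 (x+1) 1) false

def calc_prime_pairs (max_value : Int) : (List (Int × Int)) × (List (Int × Int)) × (List (Int × Int)) :=
  let r := (PySem.List.pyRange 2 (max_value+1) 1).foldl
    (fun (st : PySem.Dict Int Int × PySem.Dict Int Int × PySem.Dict Int Int) number =>
      if pv_is_prime number then
        ( if pv_is_prime (number+2) then st.1.insert number (number+2) else st.1,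
          if pv_is_prime (number+4) then st.2.1.insert number (number+4) else st.2.1,
          if pv_is_prime (number+6) then st.2.2.insert number (number+6) else st.2.2 )
      else st)
    (PySem.Dict.empty, PySem.Dict.empty, PySem.Dict.empty)
  (r.1.items, r.2.1.items, r.2.2.items)

-- ===== PORT B =====
-- B's _is_prime: while d*d <= x trial division.
def pvIsPrimeAltAux (x : Int) (d : Int) : Bool :=
  if d * d ≤ x then
    (if PySem.Int.mod x d == 0 then false else pvIsPrimeAltAux x (d+1))
  else true
termination_by (x + 1 - d).toNat
decreasing_by
  rename_i h _
  have hd : d ≤ x := by nlinarith [sq_nonneg (d - 1)]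
  omega

def pv_is_prime_alt (x : Int) : Bool :=
  if x < 2 then false else pvIsPrimeAltAux x 2

def calc_prime_pairs_alt (max_value : Int) : (List (Int × Int)) × (List (Int × Int)) × (List (Int × Int)) :=
  let primes : PySem.Set Int :=
    PySem.Set.ofList ((PySem.List.pyRange 2 (max_value+7) 1).filter (fun n => pv_is_prime_alt n))
  let r := PySem.List.pyRange 2 (max_value+1) 1
  ( (r.filter (fun p => PySem.Set.contains primes p && PySem.Set.contains primes (p+2))).map (fun p => (p, p+2)),
    (r.filter (fun p => PySem.Set.contains primes p && PySem.Set.contains primes (p+4))).map (fun p => (p, p+4)),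
    (r.filter (fun p => PySem.Set.contains primes p && PySem.Set.contains primes (p+6))).map (fun p => (p, p+6)) )

-- ===== PRECONDITION & SPEC =====
def Spec_calc_prime_pairs (max_value : Int) (out : (List (Int × Int)) × (List (Int × Int)) × (List (Int × Int))) : Prop := out = calc_prime_pairs_alt max_value
instance (max_value : Int) (out : (List (Int × Int)) × (List (Int × Int)) × (List (Int × Int))) : Decidable (Spec_calc_prime_pairs max_value out) := by unfold Spec_calc_prime_pairs; infer_instance

-- ===== CLAIM (what is proved, stated in full; the proofs are below) =====
def Claim_equal_calc_prime_pairs : Prop := ∀ (max_value : Int), Dom_calc_prime_pairs max_value → Spec_calc_prime_pairs max_value (calc_prime_pairs max_value)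

-- ===== LEMMAS AND PROOFS =====

-- proof-only helpers naming the three independent accumulator updates of A's loop
def pvStep (k : Int) : PySem.Dict Int Int → Int → PySem.Dict Int Int :=
  fun d n => if (pv_is_prime n && pv_is_prime (n+k)) = true then d.insert n (n+k) else d
def pvStep2 : PySem.Dict Int Int × PySem.Dict Int Int → Int → PySem.Dict Int Int × PySem.Dict Int Int :=
  fun st n => (pvStep 4 st.1 n, pvStep 6 st.2 n)

-- A's loop over range(a, x+1) (2 ≤ a ≤ x) returns true iff no n in [a, x) divides x.
theorem pvIsPrimeLoop_char (x : Int) : ∀ (k : Nat) (a : Int), (x - a).toNat = k → 2 ≤ a → a ≤ x →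
    (pvIsPrimeLoop x (PySem.List.pyRange a (x+1) 1) false = true ↔
      ∀ n, a ≤ n → n < x → ¬ (n ∣ x)) := by
  intro k
  induction k with
  | zero =>
    intro a hk h2 hax
    have hax' : a = x := by omega
    subst hax'
    rw [PySem.List.pyRange_one_cons (by omega), PySem.List.pyRange_one_eq_nil (by omega)]
    simp only [pvIsPrimeLoop, bne_self_eq_false, Bool.and_false, if_false, beq_self_eq_true,
      if_true, Bool.false_eq_true]
    exact iff_of_true (by trivial) (by intro n h1 h2; omega)
  | succ k ih =>
    intro a hk h2 hax
    have hax' : a < x := by omega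
    rw [PySem.List.pyRange_one_cons (by omega)]
    simp only [pvIsPrimeLoop]
    by_cases hdvd : a ∣ x
    · have hm : PySem.Int.mod x a = 0 := (PySem.Int.mod_eq_zero_iff_dvd x a).mpr hdvd
      have hcond : ((PySem.Int.mod x a == 0) && (a != x)) = true := by
        simp [hm]; omega
      rw [hcond, if_pos rfl]
      exact iff_of_false (by simp) (fun h => h a le_rfl hax' hdvd)
    · have hm : (PySem.Int.mod x a == 0) = false := by
        simp only [beq_eq_false_iff_ne, ne_eq]
        intro h; exact hdvd ((PySem.Int.mod_eq_zero_iff_dvd x a).mp h)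
      have hne : (a == x) = false := by simp; omega
      rw [hm, Bool.false_and, if_neg (by simp), hne, if_neg (by simp)]
      rw [ih (a+1) (by omega) (by omega) (by omega)]
      constructor
      · intro h n hn1 hn2 hd
        rcases eq_or_lt_of_le hn1 with rfl | hlt
        · exact hdvd hd
        · exact h n (by omega) hn2 hd
      · intro h n hn1 hn2 hd
        exact h n (by omega) hn2 hd

theorem pv_is_prime_char (x : Int) (hx : 2 ≤ x) :
    (pv_is_prime x = true ↔ ∀ n, 2 ≤ n → n < x → ¬ (n ∣ x)) := by
  exact pvIsPrimeLoop_char x (x - 2).toNat 2 rfl le_rfl hx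

theorem pv_is_prime_false (x : Int) (hx : x < 2) : pv_is_prime x = false := by
  unfold pv_is_prime
  rw [PySem.List.pyRange_one_eq_nil (by omega)]
  rfl

theorem pvIsPrimeAltAux_char (x : Int) : ∀ (k : Nat) (d : Int), (x + 1 - d).toNat = k → 2 ≤ d →
    (pvIsPrimeAltAux x d = true ↔ ∀ e, d ≤ e → e * e ≤ x → ¬ (e ∣ x)) := by
  intro k
  induction k using Nat.strong_induction_on with
  | _ k ih =>
    intro d hk h2
    rw [pvIsPrimeAltAux]
    by_cases hdd : d * d ≤ x
    · have hdx : d ≤ x := by nlinarith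
      rw [if_pos hdd]
      by_cases hdvd : d ∣ x
      · have hm : PySem.Int.mod x d = 0 := (PySem.Int.mod_eq_zero_iff_dvd x d).mpr hdvd
        rw [hm]
        exact iff_of_false (by simp) (fun h => h d le_rfl hdd hdvd)
      · have hm : (PySem.Int.mod x d == 0) = false := by
          simp only [beq_eq_false_iff_ne, ne_eq]
          intro h; exact hdvd ((PySem.Int.mod_eq_zero_iff_dvd x d).mp h)
        rw [hm, if_neg (by simp)]
        rw [ih (x + 1 - (d+1)).toNat (by omega) (d+1) rfl (by omega)]
        constructor
        · intro h e he1 he2 hd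
          rcases eq_or_lt_of_le he1 with rfl | hlt
          · exact hdvd hd
          · exact h e (by omega) he2 hd
        · intro h e he1 he2 hd
          exact h e (by omega) he2 hd
    · rw [if_neg hdd]
      refine iff_of_true rfl ?_
      intro e he1 he2 _
      have : d * d ≤ e * e := mul_le_mul he1 he1 (by omega) (by omega)
      omega

-- trial division up to x-1 agrees with trial division bounded by the square root
theorem pv_bridge (x : Int) (hx : 2 ≤ x) :
    (∀ n, 2 ≤ n → n < x → ¬ (n ∣ x)) ↔ (∀ d, 2 ≤ d → d * d ≤ x → ¬ (d ∣ x)) := by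
  constructor
  · intro h d h2 hdd hdvd
    exact h d h2 (by nlinarith) hdvd
  · intro h n h2 hnx hdvd
    obtain ⟨m, hm⟩ := hdvd
    have hn0 : 0 < n := by omega
    have hm2 : 2 ≤ m := by nlinarith
    by_cases hnn : n * n ≤ x
    · exact h n h2 hnn ⟨m, hm⟩
    · have hmn : m < n := by nlinarith
      have hmm : m * m ≤ x := by nlinarith
      exact h m hm2 hmm ⟨n, by rw [hm]; ring⟩

theorem pv_prime_eq (x : Int) : pv_is_prime x = pv_is_prime_alt x := by
  by_cases hx : x < 2
  · rw [pv_is_prime_false x hx]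
    unfold pv_is_prime_alt
    rw [if_pos hx]
  · rw [not_lt] at hx
    have halt : pv_is_prime_alt x = pvIsPrimeAltAux x 2 := by
      unfold pv_is_prime_alt; rw [if_neg (by omega)]
    rw [halt, Bool.eq_iff_iff, pv_is_prime_char x hx,
      pvIsPrimeAltAux_char x (x + 1 - 2).toNat 2 rfl le_rfl]
    exact pv_bridge x hx

theorem pv_contains_primes (m q : Int) (h2 : 2 ≤ q) (h7 : q < m + 7) :
    PySem.Set.contains
      (PySem.Set.ofList ((PySem.List.pyRange 2 (m+7) 1).filter (fun n => pv_is_prime_alt n))) q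
      = pv_is_prime_alt q := by
  have hmem : q ∈ PySem.Set.ofList ((PySem.List.pyRange 2 (m+7) 1).filter (fun n => pv_is_prime_alt n))
      ↔ pv_is_prime_alt q = true := by
    rw [PySem.Set.mem_ofList, List.mem_filter, PySem.List.mem_pyRange_one]
    constructor
    · exact fun h => h.2
    · exact fun h => ⟨⟨h2, h7⟩, h⟩
  cases halt : pv_is_prime_alt q with
  | true =>
    simp only [PySem.Set.contains, List.contains_eq_mem, decide_eq_true_eq]
    exact hmem.mpr halt
  | false =>
    simp only [PySem.Set.contains, List.contains_eq_mem]
    exact decide_eq_false (fun h => by rw [hmem.mp h] at halt; cases halt)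

-- one component of A's fold equals B's filter-and-map
theorem pv_component (m k : Int) (h2 : 2 ≤ k) (hk : k ≤ 6) :
    ((PySem.List.pyRange 2 (m+1) 1).foldl (pvStep k) PySem.Dict.empty).items
      = ((PySem.List.pyRange 2 (m+1) 1).filter
          (fun p => PySem.Set.contains (PySem.Set.ofList ((PySem.List.pyRange 2 (m+7) 1).filter (fun n => pv_is_prime_alt n))) p
            && PySem.Set.contains (PySem.Set.ofList ((PySem.List.pyRange 2 (m+7) 1).filter (fun n => pv_is_prime_alt n))) (p+k))).map
          (fun p => (p, p+k)) := by
  unfold pvStep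
  rw [← List.foldl_filter]
  rw [PySem.Dict.items_foldl_insert_fresh _ (fun n => n) (fun n => n + k) PySem.Dict.empty
      (fun a _ => PySem.Dict.contains_empty a)
      (by simpa using ((PySem.List.nodup_pyRange_one 2 (m+1)).filter _))]
  have hemp : (PySem.Dict.empty : PySem.Dict Int Int).items = [] := rfl
  rw [hemp, List.nil_append]
  congr 1
  apply List.filter_congr
  intro p hp
  rw [PySem.List.mem_pyRange_one] at hp
  rw [pv_contains_primes m p hp.1 (by omega), pv_contains_primes m (p+k) (by omega) (by omega)]
  rw [pv_prime_eq, pv_prime_eq]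

-- ===== VERDICT (by name: the statement is the Claim_ definition above) =====
theorem calc_prime_pairs_spec : Claim_equal_calc_prime_pairs := by
  intro m _
  unfold Spec_calc_prime_pairs
  simp only [calc_prime_pairs, calc_prime_pairs_alt]
  have hstep : (fun (st : PySem.Dict Int Int × PySem.Dict Int Int × PySem.Dict Int Int) number =>
      if pv_is_prime number then
        ( if pv_is_prime (number+2) then st.1.insert number (number+2) else st.1,
          if pv_is_prime (number+4) then st.2.1.insert number (number+4) else st.2.1,
          if pv_is_prime (number+6) then st.2.2.insert number (number+6) else st.2.2 )
      else st)
      = (fun (st : PySem.Dict Int Int × PySem.Dict Int Int × PySem.Dict Int Int) (n : Int) =>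
        (pvStep 2 st.1 n, pvStep2 st.2 n)) := by
    funext st n
    cases h0 : pv_is_prime n <;>
      cases h1 : pv_is_prime (n+2) <;>
        cases h2 : pv_is_prime (n+4) <;>
          cases h3 : pv_is_prime (n+6) <;>
            simp [pvStep, pvStep2, h0, h1, h2, h3]
  rw [hstep, PySem.List.foldl_prod_mk (f := pvStep 2) (g := pvStep2)]
  unfold pvStep2
  rw [PySem.List.foldl_prod_mk (f := pvStep 4) (g := pvStep 6)]
  refine Prod.ext ?_ (Prod.ext ?_ ?_)
  · exact pv_component m 2 le_rfl (by omega)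
  · exact pv_component m 4 (by omega) (by omega)
  · exact pv_component m 6 (by omega) (by omega)
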